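-- pv_equiv track=rewrite | github.com/shredpap/FOCP | week4/programs04/Q2.py | countchr
-- ===== SOURCE A (Python) =====
-- def countchr(a):
--     lowcnt=0
--     upcnt=0
--     for i in a:
--         if (i.islower()):
--             lowcnt+=1
--         elif i!=" ":
--             upcnt+=1
--     return lowcnt, upcnt
-- ===== SOURCE B (Python) =====
-- def countchr(a):
--     lowcnt = sum(1 for c in a if c.islower())
--     return lowcnt, len(a) - a.count(' ') - lowcnt
-- ===== Notes on version B (the rewrite author's own statement) =====
-- stated objective: alternative
-- what changed: Counts lowercase characters once, then derives the second count arithmetically by subtracting the space count and the lowercase count from the string length, instead of testing the non-space/non-lowercase predicate per character.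
import Mathlib
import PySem

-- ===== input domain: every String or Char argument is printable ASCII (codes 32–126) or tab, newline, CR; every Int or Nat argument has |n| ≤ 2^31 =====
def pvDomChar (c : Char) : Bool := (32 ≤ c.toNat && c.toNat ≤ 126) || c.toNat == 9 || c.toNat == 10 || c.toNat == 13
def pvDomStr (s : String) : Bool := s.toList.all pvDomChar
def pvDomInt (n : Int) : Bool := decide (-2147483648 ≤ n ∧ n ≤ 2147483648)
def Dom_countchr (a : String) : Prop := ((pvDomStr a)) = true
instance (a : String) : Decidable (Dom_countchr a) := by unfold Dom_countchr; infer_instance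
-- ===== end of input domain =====

-- B counts lowercase characters once and derives the second count arithmetically from the length and the space count (alternative decomposition, same asymptotic cost).


-- ===== PORT A =====
def countchr (a : String) : Int × Int :=
  a.toList.foldl
    (fun st i =>
      if PySem.Chars.islower i then (st.1 + 1, st.2)
      else if i ≠ ' ' then (st.1, st.2 + 1)
      else st)
    (0, 0)

-- ===== PORT B =====
def countchr_alt (a : String) : Int × Int :=
  let lowcnt : Int := (a.toList.countP (fun c => PySem.Chars.islower c) : Int)
  (lowcnt, (PySem.Str.len a : Int) - (PySem.Str.count a " " : Int) - lowcnt)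

-- ===== PRECONDITION & SPEC =====
def Spec_countchr (a : String) (out : Int × Int) : Prop := out = countchr_alt a
instance (a : String) (out : Int × Int) : Decidable (Spec_countchr a out) := by unfold Spec_countchr; infer_instance

-- ===== CLAIM =====
def Claim_equal_countchr : Prop := ∀ (a : String), Dom_countchr a → Spec_countchr a (countchr a)

-- ===== LEMMAS AND PROOFS =====

-- A's loop accumulates the two countP's.
theorem pvA_fold (l : List Char) (x y : Int) :
    l.foldl
      (fun st i =>
        if PySem.Chars.islower i then (st.1 + 1, st.2)
        else if i ≠ ' ' then (st.1, st.2 + 1)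
        else st)
      (x, y)
    = (x + (l.countP (fun c => PySem.Chars.islower c) : Int),
       y + (l.countP (fun c => !PySem.Chars.islower c && c ≠ ' ') : Int)) := by
  induction l generalizing x y with
  | nil => simp
  | cons c l ih =>
    rw [List.foldl_cons]
    by_cases h : PySem.Chars.islower c = true
    · rw [if_pos h, ih]
      simp [h, Prod.ext_iff]
      omega
    · rw [if_neg h]
      by_cases h2 : c = ' '
      · rw [if_neg (by simp [h2]), ih]
        simp [h2, show PySem.Chars.islower ' ' = false from by decide]
      · rw [if_pos h2, ih]
        simp [h, h2, Prod.ext_iff]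
        ring

-- Counting a single-char pattern is List.count.
theorem pvGo (c : Char) (fuel : Nat) : ∀ (l : List Char) (acc : Nat), l.length ≤ fuel →
    PySem.Chars.count.go [c] fuel l acc = acc + l.count c := by
  induction fuel with
  | zero =>
    intro l acc h
    have : l = [] := List.eq_nil_of_length_eq_zero (Nat.le_zero.mp h)
    subst this
    simp [PySem.Chars.count.go]
  | succ n ih =>
    intro l acc h
    cases l with
    | nil => simp [PySem.Chars.count.go]
    | cons x t =>
      rw [PySem.Chars.count.go]
      by_cases hx : c = x
      · subst hx
        simp only [List.isPrefixOf, beq_self_eq_true, Bool.true_and, if_true]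
        rw [List.length_singleton, List.drop_one, List.tail_cons,
          ih t (acc + 1) (by simpa using Nat.le_of_succ_le_succ h)]
        simp
        omega
      · have : ([c].isPrefixOf (x :: t)) = false := by
          simp [List.isPrefixOf, hx]
        rw [this]
        simp only [if_false, Bool.false_eq_true]
        rw [ih t acc (by simpa using Nat.le_of_succ_le_succ h)]
        simp [List.count_cons]
        intro he; exact absurd he.symm hx

theorem pvCount_singleton (l : List Char) (c : Char) :
    PySem.Chars.count l [c] = l.count c := by
  simp [PySem.Chars.count, pvGo c l.length l 0 le_rfl]

-- The three character classes partition the string's length.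
theorem pvPartition (l : List Char) :
    (l.countP (fun c => !PySem.Chars.islower c && c ≠ ' ') : Int)
      = (l.length : Int) - (l.count ' ' : Int)
        - (l.countP (fun c => PySem.Chars.islower c) : Int) := by
  induction l with
  | nil => simp
  | cons c l ih =>
    by_cases h : PySem.Chars.islower c = true
    · have hc : c ≠ ' ' := by
        rintro rfl; exact absurd h (by decide)
      simp [List.countP_cons, h, hc]
      simp only [ne_eq, decide_not] at ih ⊢
      push_cast at ih ⊢
      linarith [ih]
    · by_cases h2 : c = ' '
      · simp [List.countP_cons, List.count_cons, h2]
        simp only [ne_eq, decide_not] at ih ⊢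
        push_cast at ih ⊢
        linarith [ih]
      · simp [List.countP_cons, h, h2]
        simp only [ne_eq, decide_not] at ih ⊢
        push_cast at ih ⊢
        linarith [ih]

-- ===== VERDICT =====
theorem countchr_spec : Claim_equal_countchr := by
  intro a _
  unfold Spec_countchr countchr countchr_alt
  rw [pvA_fold]
  simp only [PySem.Str.count, PySem.Str.len_eq]
  rw [show (" " : String).toList = [' '] from rfl, pvCount_singleton, pvPartition]
  simp
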